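-- pv_equiv track=rewrite | github.com/Hieu-L/flipflop | program.py | self_defense
-- ===== SOURCE A (Python) =====
-- def self_defense(argset,atks) :
--     """
--     Return True or False \n
--     argset : a list of arguments | ex : [ 'A' , 'B' ] \n
--     atks : a list of tuples of arguments, representing attacks | ex: [ ('Atk1','Def1') , ('Atk2','Def2') ] \n\n
--     checks if 'argset' has the self-defense property.
--     """
--
--     for s in argset :
--         for a,d in atks :
--             # if 's' is attacked by a state 'a' ...
--             if s == d :
--                 self_defended = False
--
--                 # ... try to find an argument in 'argset' that attacks 'a ...
--                 for ap,dp in atks :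
--                     if (dp == a) and (ap in argset) :
--                         self_defended = True
--                         break
--
--                 # ... and if you can't , argset is not self defensive
--                 if not self_defended :
--                     return False
--
--
--     return True
-- ===== SOURCE B (Python) =====
-- def self_defense(argset, atks):
--     args = set(argset)
--     attackers = {a for a, d in atks if d in args}
--     attacked = {d for a, d in atks if a in args}
--     return attackers <= attacked
-- ===== Notes on version B (the rewrite author's own statement) =====
-- stated objective: simpler
-- what changed: Replaces the triple-nested loop with early exit by one pass over atks building two sets (arguments attacking argset, arguments attacked by argset) and a single subset test.
import Mathlib
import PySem

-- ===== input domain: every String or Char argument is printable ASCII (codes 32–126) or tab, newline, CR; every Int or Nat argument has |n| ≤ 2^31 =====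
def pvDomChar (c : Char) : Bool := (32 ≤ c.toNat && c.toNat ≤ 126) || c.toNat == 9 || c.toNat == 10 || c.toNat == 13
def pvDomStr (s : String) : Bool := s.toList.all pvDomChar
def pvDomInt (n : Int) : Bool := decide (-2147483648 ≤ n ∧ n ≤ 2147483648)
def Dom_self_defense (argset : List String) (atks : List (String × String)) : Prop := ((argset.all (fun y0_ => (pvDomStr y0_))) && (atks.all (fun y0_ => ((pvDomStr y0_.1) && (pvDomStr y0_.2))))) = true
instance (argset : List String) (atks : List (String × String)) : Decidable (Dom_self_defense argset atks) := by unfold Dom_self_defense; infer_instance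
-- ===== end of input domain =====

-- B replaces A's triple-nested loop by two set comprehensions over atks and one subset test (simpler, asymptotically faster).

-- ===== PORT A =====
-- inner 'for ap,dp in atks: if (dp == a) and (ap in argset): self_defended = True; break'
def pvFindDef (argset : List String) (a : String) : List (String × String) → Bool
  | [] => false
  | (ap, dp) :: t => if dp == a && argset.contains ap then true else pvFindDef argset a t

-- middle 'for a,d in atks: if s == d: … if not self_defended: return False'  (false = early return False)
def pvMidLoop (argset : List String) (atks : List (String × String)) (s : String) : List (String × String) → Bool
  | [] => true
  | (a, d) :: t =>
      if s == d then
        if pvFindDef argset a atks then pvMidLoop argset atks s t else false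
      else pvMidLoop argset atks s t

-- outer 'for s in argset'
def pvOuterLoop (argset : List String) (atks : List (String × String)) : List String → Bool
  | [] => true
  | s :: t => if pvMidLoop argset atks s atks then pvOuterLoop argset atks t else false

def self_defense (argset : List String) (atks : List (String × String)) : Bool :=
  pvOuterLoop argset atks argset

-- ===== PORT B =====
def self_defense_alt (argset : List String) (atks : List (String × String)) : Bool :=
  let args : PySem.Set String := PySem.Set.ofList argset
  let attackers : PySem.Set String :=
    PySem.Set.ofList ((atks.filter (fun p => PySem.Set.contains args p.2)).map (fun p => p.1))
  let attacked : PySem.Set String :=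
    PySem.Set.ofList ((atks.filter (fun p => PySem.Set.contains args p.1)).map (fun p => p.2))
  PySem.Set.issubset attackers attacked

-- ===== PRECONDITION & SPEC =====
def Spec_self_defense (argset : List String) (atks : List (String × String)) (out : Bool) : Prop := out = self_defense_alt argset atks
instance (argset : List String) (atks : List (String × String)) (out : Bool) : Decidable (Spec_self_defense argset atks out) := by unfold Spec_self_defense; infer_instance

-- ===== CLAIM (what is proved, stated in full; the proofs are below) =====
def Claim_equal_self_defense : Prop := ∀ (argset : List String) (atks : List (String × String)), Dom_self_defense argset atks → Spec_self_defense argset atks (self_defense argset atks)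

-- ===== LEMMAS AND PROOFS =====

theorem pvFindDef_eq_any (argset : List String) (a : String) (l : List (String × String)) :
    pvFindDef argset a l = l.any (fun q => q.2 == a && argset.contains q.1) := by
  induction l with
  | nil => rfl
  | cons q t ih =>
      obtain ⟨ap, dp⟩ := q
      simp only [pvFindDef, List.any_cons]
      split_ifs with h <;> simp_all

theorem pvMidLoop_eq_all (argset : List String) (atks : List (String × String)) (s : String)
    (l : List (String × String)) :
    pvMidLoop argset atks s l = l.all (fun p => !(s == p.2) || pvFindDef argset p.1 atks) := by
  induction l with
  | nil => rfl
  | cons p t ih =>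
      obtain ⟨a, d⟩ := p
      simp only [pvMidLoop, List.all_cons]
      split_ifs with h1 h2 <;> simp_all

theorem pvOuterLoop_eq_all (argset : List String) (atks : List (String × String))
    (l : List String) :
    pvOuterLoop argset atks l = l.all (fun s => pvMidLoop argset atks s atks) := by
  induction l with
  | nil => rfl
  | cons s t ih =>
      simp only [pvOuterLoop, List.all_cons]
      split_ifs with h <;> simp_all

-- ===== VERDICT (by name: the statement is the Claim_ definition above) =====
theorem self_defense_spec : Claim_equal_self_defense := by
  intro argset atks _
  unfold Spec_self_defense
  rw [Bool.eq_iff_iff]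
  unfold self_defense self_defense_alt
  rw [pvOuterLoop_eq_all]
  simp only [pvMidLoop_eq_all, pvFindDef_eq_any, PySem.Set.issubset_iff,
    PySem.Set.mem_ofList, List.mem_map, List.mem_filter, List.all_eq_true,
    List.any_eq_true, Bool.or_eq_true, Bool.not_eq_eq_eq_not, Bool.not_true,
    beq_iff_eq, Bool.and_eq_true, List.contains_iff_mem,
    PySem.Set.contains_eq_listContains, beq_eq_false_iff_ne, ne_eq]
  constructor
  · rintro h x ⟨p, ⟨hp, hd⟩, rfl⟩
    have hd' : p.2 ∈ argset := by
      simpa [PySem.Set.mem_ofList, List.contains_iff_mem] using hd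
    obtain ⟨q, hq, hqa, hqm⟩ := (h p.2 hd' p hp).resolve_left (fun h' => h' rfl)
    exact ⟨q, ⟨hq, by simpa [PySem.Set.mem_ofList, List.contains_iff_mem] using hqm⟩, hqa⟩
  · rintro h s hs p hp
    by_cases he : s = p.2
    · right
      obtain ⟨q, ⟨hq, hqm⟩, hqa⟩ := h p.1 ⟨p, ⟨hp, by
        simpa [PySem.Set.mem_ofList, List.contains_iff_mem] using he ▸ hs⟩, rfl⟩
      exact ⟨q, hq, hqa, by simpa [PySem.Set.mem_ofList, List.contains_iff_mem] using hqm⟩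
    · exact Or.inl he
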